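-- pv_equiv track=rewrite | github.com/mbunse/kids_phone | fetap_keypad.py | _get_row_col_from_pin
-- ===== SOURCE A (Python) =====
-- ROW_PINS = [14, 16, 21, 20]
--
-- COL_PINS = [24, 18, 15]
--
-- def _get_row_col_from_pin(pin):
--     row, col = (None,None)
--     for idx, ipin in enumerate(ROW_PINS+COL_PINS):
--         if ipin==pin:
--             # Floor division
--             if (idx // 4) == 0:
--                 row=idx % 4
--             else:
--                 col=idx % 4
--             return row, col
--     return row, col
-- ===== SOURCE B (Python) =====
-- ROW_PINS = [14, 16, 21, 20]
--
-- COL_PINS = [24, 18, 15]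
--
-- def _get_row_col_from_pin(pin):
--     if pin in ROW_PINS:
--         return ROW_PINS.index(pin), None
--     if pin in COL_PINS:
--         return None, COL_PINS.index(pin)
--     return None, None
-- ===== Notes on version B (the rewrite author's own statement) =====
-- stated objective: simpler
-- what changed: Replaces the enumerate over the concatenated pin lists with its floor-division/modulus index decoding by two separate membership tests with per-list index lookups, returning the tuple directly.
import Mathlib
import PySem

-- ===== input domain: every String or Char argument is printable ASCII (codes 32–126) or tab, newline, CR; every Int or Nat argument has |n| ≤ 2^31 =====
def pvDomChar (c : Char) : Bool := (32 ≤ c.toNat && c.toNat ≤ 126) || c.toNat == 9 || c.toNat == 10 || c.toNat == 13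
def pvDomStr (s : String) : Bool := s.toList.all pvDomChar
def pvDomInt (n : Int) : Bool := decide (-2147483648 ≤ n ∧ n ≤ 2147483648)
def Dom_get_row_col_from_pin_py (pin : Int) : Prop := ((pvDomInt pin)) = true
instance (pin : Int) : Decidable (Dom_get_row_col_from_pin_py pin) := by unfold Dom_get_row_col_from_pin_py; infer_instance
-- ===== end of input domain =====

-- B: separate membership/index tests per pin list instead of A's concatenated enumerate with idx//4 / idx%4 decoding (simpler).


-- ===== PORT A =====
-- Port of A: loop over enumerate(ROW_PINS+COL_PINS) with early return on first match.
def pvRowPins : List Int := [14, 16, 21, 20]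
def pvColPins : List Int := [24, 18, 15]
def pvLoopA (pin : Int) : List (Int × Int) → Option Int × Option Int
  | [] => (none, none)
  | (idx, ipin) :: rest =>
      if ipin == pin then
        if PySem.Int.floordiv idx 4 == 0 then
          (some (PySem.Int.mod idx 4), none)
        else
          (none, some (PySem.Int.mod idx 4))
      else pvLoopA pin rest

def get_row_col_from_pin_py (pin : Int) : Option Int × Option Int :=
  pvLoopA pin (PySem.List.enumerate (pvRowPins ++ pvColPins))

-- ===== PORT B =====
def get_row_col_from_pin_py_alt (pin : Int) : Option Int × Option Int :=
  if pin ∈ pvRowPins then ((PySem.List.index? pvRowPins pin).map (fun n => (n : Int)), none)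
  else if pin ∈ pvColPins then (none, (PySem.List.index? pvColPins pin).map (fun n => (n : Int)))
  else (none, none)

-- ===== PRECONDITION & SPEC =====
def Spec_get_row_col_from_pin_py (pin : Int) (out : Option Int × Option Int) : Prop := out = get_row_col_from_pin_py_alt pin
instance (pin : Int) (out : Option Int × Option Int) : Decidable (Spec_get_row_col_from_pin_py pin out) := by unfold Spec_get_row_col_from_pin_py; infer_instance

-- ===== CLAIM (what is proved, stated in full; the proofs are below) =====
def Claim_equal_get_row_col_from_pin_py : Prop := ∀ (pin : Int), Dom_get_row_col_from_pin_py pin → Spec_get_row_col_from_pin_py pin (get_row_col_from_pin_py pin)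

-- ===== LEMMAS AND PROOFS =====

-- ===== VERDICT (by name: the statement is the Claim_ definition above) =====
theorem get_row_col_from_pin_py_spec : Claim_equal_get_row_col_from_pin_py := by
  intro pin _
  unfold Spec_get_row_col_from_pin_py get_row_col_from_pin_py get_row_col_from_pin_py_alt
  simp only [pvRowPins, pvColPins, List.cons_append, List.nil_append,
    PySem.List.enumerate_cons, PySem.List.enumerate_nil, pvLoopA, PySem.List.index?]
  norm_num [PySem.Int.floordiv, PySem.Int.mod]
  split_ifs <;> first
  | (subst_vars; decide)
  | (exfalso; omega)
  | (subst_vars; simp_all)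
  | simp_all
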